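-- pv_equiv track=rewrite | github.com/ychafiqui/cv_job_parsing | streamlit_web_app/job_data_static/functions.py | extract_months
-- ===== SOURCE A (Python) =====
-- MONTHS = ["january", "february", "march", "april", "may", "june", "july", "august",
--           "september", "october", "november", "december"]
--
-- def extract_months(date_range):
--     date_range = date_range.lower()
--     months = []
--     for month in MONTHS:
--         if month in date_range:
--             months.append(month)
--     # reorder list of months according to their position in the date range
--     months = sorted(months, key=lambda x: date_range.index(x))
--     if len(months) > 1:
--         return months[0], months[1]
--     elif len(months) == 1:
--         return months[0], None
--     else:
--         return None, None
-- ===== SOURCE B (Python) =====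
-- MONTHS = ["january", "february", "march", "april", "may", "june", "july", "august",
--           "september", "october", "november", "december"]
--
-- def extract_months(date_range):
--     s = date_range.lower()
--     first = None
--     for i in range(len(s)):
--         m = next((m for m in MONTHS if s.startswith(m, i) and m != first), None)
--         if m is not None:
--             if first is None:
--                 first = m
--             else:
--                 return first, m  # early stop: second distinct month found
--     return first, None
-- ===== Notes on version B (the rewrite author's own statement) =====
-- stated objective: alternative
-- what changed: B replaces A's build-then-sort strategy (collect every month contained in the string, then sort them by str.index) with a recursive/early-stopping left-to-right positional scan: at each position it looks for the single month name starting there, records the first one found, and returns as soon as a second distinct month appears, so no sort and no repeated substring searches are needed.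
import Mathlib
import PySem

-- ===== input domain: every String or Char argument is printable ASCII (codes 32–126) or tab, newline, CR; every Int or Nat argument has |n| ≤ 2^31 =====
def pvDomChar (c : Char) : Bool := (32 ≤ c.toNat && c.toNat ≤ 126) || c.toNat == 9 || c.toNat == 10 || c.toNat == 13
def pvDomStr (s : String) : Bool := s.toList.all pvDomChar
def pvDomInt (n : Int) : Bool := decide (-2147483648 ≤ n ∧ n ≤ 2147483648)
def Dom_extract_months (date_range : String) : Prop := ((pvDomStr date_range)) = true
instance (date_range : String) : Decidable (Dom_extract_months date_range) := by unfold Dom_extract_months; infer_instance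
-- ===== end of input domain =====

-- B replaces A's collect-every-month-then-sort-by-index with a recursive left-to-right
-- positional scan that stops as soon as a second distinct month is found; same return
-- value on every input (A is total).

def pvMonths : List (List Char) :=
  [['j', 'a', 'n', 'u', 'a', 'r', 'y'],
   ['f', 'e', 'b', 'r', 'u', 'a', 'r', 'y'],
   ['m', 'a', 'r', 'c', 'h'],
   ['a', 'p', 'r', 'i', 'l'],
   ['m', 'a', 'y'],
   ['j', 'u', 'n', 'e'],
   ['j', 'u', 'l', 'y'],
   ['a', 'u', 'g', 'u', 's', 't'],
   ['s', 'e', 'p', 't', 'e', 'm', 'b', 'e', 'r'],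
   ['o', 'c', 't', 'o', 'b', 'e', 'r'],
   ['n', 'o', 'v', 'e', 'm', 'b', 'e', 'r'],
   ['d', 'e', 'c', 'e', 'm', 'b', 'e', 'r']]

-- ===== PORT A =====
def extract_months (date_range : String) : Option String × Option String :=
  let s := PySem.Chars.lower date_range.toList
  let months := pvMonths.foldl
    (fun acc month => if PySem.Chars.isIn month s then acc ++ [month] else acc) []
  let months := PySem.List.sorted months (fun x => PySem.Chars.find s x) false
  match months with
  | m0 :: m1 :: _ => (some (String.ofList m0), some (String.ofList m1))
  | [m0] => (some (String.ofList m0), none)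
  | [] => (none, none)

-- ===== PORT B =====
-- the loop 'for i in range(len(s)): m = next(...); …' with its early return, as structural
-- recursion on the position; 'next((m for m in MONTHS if …), None)' is List.find?, and
-- 's.startswith(m, i)' is exactly 'm is a prefix of s dropped at i' (0 ≤ i here).
def pvScanB (s : List Char) (i : Nat) (first : Option (List Char)) :
    Option (List Char) × Option (List Char) :=
  if _h : i < s.length then
    match pvMonths.find? (fun m => PySem.Chars.startswith (s.drop i) m && decide (some m ≠ first)) with
    | some m =>
      match first with
      | none => pvScanB s (i + 1) (some m)
      | some f => (some f, some m)
    | none => pvScanB s (i + 1) first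
  else
    (first, none)
termination_by s.length - i

def extract_months_alt (date_range : String) : Option String × Option String :=
  let r := pvScanB (PySem.Chars.lower date_range.toList) 0 none
  (r.1.map String.ofList, r.2.map String.ofList)

-- ===== PRECONDITION & SPEC =====
def Spec_extract_months (date_range : String) (out : Option String × Option String) : Prop := out = extract_months_alt date_range
instance (date_range : String) (out : Option String × Option String) : Decidable (Spec_extract_months date_range out) := by unfold Spec_extract_months; infer_instance

-- ===== CLAIM (what is proved, stated in full; the proofs are below) =====
def Claim_equal_extract_months : Prop := ∀ (date_range : String), Dom_extract_months date_range → Spec_extract_months date_range (extract_months date_range)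

-- ===== LEMMAS AND PROOFS =====

-- proof-side ghost: the list of months present in s, in order of first occurrence,
-- built by a positional scan up to position n (never executed by either port)
def pvGhost (s : List Char) (n : Nat) : List (List Char) :=
  (PySem.List.pyRange 0 (n : Int) 1).foldl
    (fun acc i =>
      pvMonths.foldl
        (fun acc m =>
          if PySem.List.slice s (some i) (some (i + (m.length : Int))) = m ∧ m ∉ acc
          then acc ++ [m] else acc) acc) []

theorem months_prefix_free : ∀ m1 ∈ pvMonths, ∀ m2 ∈ pvMonths, m1 <+: m2 → m1 = m2 := by decide

theorem months_ne_nil : ∀ m ∈ pvMonths, m ≠ [] := by decide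

theorem months_nodup : pvMonths.Nodup := by decide

-- no two distinct month names can start at the same position
theorem uniq_at (s : List Char) (i : Nat) (a b : List Char) (ha : a ∈ pvMonths) (hb : b ∈ pvMonths)
    (hpa : a <+: s.drop i) (hpb : b <+: s.drop i) : a = b := by
  rcases List.prefix_or_prefix_of_prefix hpa hpb with h | h
  · exact months_prefix_free a ha b hb h
  · exact (months_prefix_free b hb a ha h).symm

-- a prefix occurrence at j bounds the first-occurrence index
theorem prefix_drop_key (s m : List Char) (j : Nat) (h : m <+: s.drop j) :
    0 ≤ PySem.Chars.find s m ∧ PySem.Chars.find s m ≤ (j : Int) := by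
  have h0 : 0 ≤ PySem.Chars.find s m :=
    (PySem.Chars.find_nonneg_iff s m).mpr (h.isInfix.trans (List.drop_suffix j s).isInfix)
  refine ⟨h0, ?_⟩
  by_contra hlt
  exact (PySem.Chars.find_spec h0).2 j (by omega) h

theorem key_lt_len (s m : List Char) (hm : m ≠ []) (h0 : 0 ≤ PySem.Chars.find s m) :
    PySem.Chars.find s m < (s.length : Int) := by
  have hp := (PySem.Chars.find_spec h0).1
  have hle := PySem.Chars.find_le_length s m
  rcases eq_or_lt_of_le hle with he | h; swap
  · exact h
  · exfalso
    rw [he] at hp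
    simp at hp
    exact hm hp

theorem slice_eq_iff (s m : List Char) (n : Nat) :
    (PySem.List.slice s (some (n : Int)) (some ((n : Int) + (m.length : Int))) = m) ↔ m <+: s.drop n := by
  rw [PySem.List.slice_natCast_add, List.prefix_iff_eq_take]
  exact eq_comm

-- invariant of the ghost scan's inner loop over the month list at position n
theorem inner_fold (s : List Char) (n : Nat) (l : List (List Char)) (acc : List (List Char))
    (hl : ∀ m ∈ l, m ∈ pvMonths)
    (hsub : ∀ a ∈ acc, a ∈ pvMonths)
    (hnd : acc.Nodup)
    (hpw : acc.Pairwise (fun a b => PySem.Chars.find s a < PySem.Chars.find s b))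
    (hub : ∀ a ∈ acc, 0 ≤ PySem.Chars.find s a ∧ PySem.Chars.find s a ≤ (n : Int))
    (hcomp : ∀ x ∈ pvMonths, 0 ≤ PySem.Chars.find s x → PySem.Chars.find s x < (n : Int) → x ∈ acc) :
    (∀ a ∈ l.foldl (fun acc m => if PySem.List.slice s (some (n : Int)) (some ((n : Int) + (m.length : Int))) = m ∧ m ∉ acc then acc ++ [m] else acc) acc, a ∈ pvMonths) ∧
    (l.foldl (fun acc m => if PySem.List.slice s (some (n : Int)) (some ((n : Int) + (m.length : Int))) = m ∧ m ∉ acc then acc ++ [m] else acc) acc).Nodup ∧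
    (l.foldl (fun acc m => if PySem.List.slice s (some (n : Int)) (some ((n : Int) + (m.length : Int))) = m ∧ m ∉ acc then acc ++ [m] else acc) acc).Pairwise (fun a b => PySem.Chars.find s a < PySem.Chars.find s b) ∧
    (∀ a ∈ l.foldl (fun acc m => if PySem.List.slice s (some (n : Int)) (some ((n : Int) + (m.length : Int))) = m ∧ m ∉ acc then acc ++ [m] else acc) acc, 0 ≤ PySem.Chars.find s a ∧ PySem.Chars.find s a ≤ (n : Int)) ∧
    (∀ x, x ∈ l.foldl (fun acc m => if PySem.List.slice s (some (n : Int)) (some ((n : Int) + (m.length : Int))) = m ∧ m ∉ acc then acc ++ [m] else acc) acc ↔ x ∈ acc ∨ (x ∈ l ∧ x <+: s.drop n)) := by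
  induction l generalizing acc with
  | nil => exact ⟨hsub, hnd, hpw, hub, by simp⟩
  | cons m l ih =>
    have hm : m ∈ pvMonths := hl m (List.mem_cons_self ..)
    have hl' : ∀ x ∈ l, x ∈ pvMonths := fun x hx => hl x (List.mem_cons_of_mem _ hx)
    by_cases hc : PySem.List.slice s (some (n : Int)) (some ((n : Int) + (m.length : Int))) = m ∧ m ∉ acc
    · -- m matches at n and is new: it is appended; its key is exactly n
      have hpre : m <+: s.drop n := (slice_eq_iff s m n).mp hc.1
      have hkb := prefix_drop_key s m n hpre
      have hkeq : PySem.Chars.find s m = (n : Int) := by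
        rcases eq_or_lt_of_le hkb.2 with he | hlt
        · exact he
        · exact absurd (hcomp m hm hkb.1 hlt) hc.2
      have hacc_lt : ∀ a ∈ acc, PySem.Chars.find s a < PySem.Chars.find s m := by
        intro a hamem
        rcases eq_or_lt_of_le (hub a hamem).2 with he | hlt
        · exfalso
          have hpa : a <+: s.drop n := by
            have h1 := (PySem.Chars.find_spec (hub a hamem).1).1
            rw [he] at h1
            simpa using h1
          exact hc.2 (uniq_at s n a m (hsub a hamem) hm hpa hpre ▸ hamem)
        · omega
      have hstep : (∀ x ∈ acc ++ [m], x ∈ pvMonths) ∧ (acc ++ [m]).Nodup ∧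
          (acc ++ [m]).Pairwise (fun a b => PySem.Chars.find s a < PySem.Chars.find s b) ∧
          (∀ a ∈ acc ++ [m], 0 ≤ PySem.Chars.find s a ∧ PySem.Chars.find s a ≤ (n : Int)) ∧
          (∀ x ∈ pvMonths, 0 ≤ PySem.Chars.find s x → PySem.Chars.find s x < (n : Int) → x ∈ acc ++ [m]) := by
        refine ⟨?_, ?_, ?_, ?_, ?_⟩
        · intro x hx; rcases List.mem_append.mp hx with h | h
          · exact hsub x h
          · simp at h; subst h; exact hm
        · refine hnd.append (List.nodup_singleton m) ?_
          intro a ha hb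
          simp at hb; subst hb; exact hc.2 ha
        · rw [List.pairwise_append]
          exact ⟨hpw, List.pairwise_singleton .., by intro a ha b hb; simp at hb; subst hb; exact hacc_lt a ha⟩
        · intro a ha; rcases List.mem_append.mp ha with h | h
          · exact hub a h
          · simp at h; subst h; exact ⟨hkb.1, by omega⟩
        · intro x hx h0 hlt; exact List.mem_append.mpr (Or.inl (hcomp x hx h0 hlt))
      simp only [List.foldl_cons, if_pos hc]
      obtain ⟨r1, r2, r3, r4, r5⟩ := ih (acc ++ [m]) hl' hstep.1 hstep.2.1 hstep.2.2.1 hstep.2.2.2.1 hstep.2.2.2.2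
      refine ⟨r1, r2, r3, r4, ?_⟩
      intro x
      rw [r5 x]
      constructor
      · rintro (hx | hx)
        · rcases List.mem_append.mp hx with h | h
          · exact Or.inl h
          · simp at h; subst h; exact Or.inr ⟨List.mem_cons_self .., hpre⟩
        · exact Or.inr ⟨List.mem_cons_of_mem _ hx.1, hx.2⟩
      · rintro (hx | ⟨hx, hpx⟩)
        · exact Or.inl (List.mem_append.mpr (Or.inl hx))
        · rcases List.mem_cons.mp hx with he | h
          · subst he; exact Or.inl (List.mem_append.mpr (Or.inr (List.mem_singleton.mpr rfl)))
          · exact Or.inr ⟨h, hpx⟩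
    · -- m does not match at n (or was already collected): acc unchanged
      simp only [List.foldl_cons, if_neg hc]
      obtain ⟨r1, r2, r3, r4, r5⟩ := ih acc hl' hsub hnd hpw hub hcomp
      refine ⟨r1, r2, r3, r4, ?_⟩
      intro x
      rw [r5 x]
      constructor
      · rintro (hx | hx)
        · exact Or.inl hx
        · exact Or.inr ⟨List.mem_cons_of_mem _ hx.1, hx.2⟩
      · rintro (hx | ⟨hx, hpx⟩)
        · exact Or.inl hx
        · rcases List.mem_cons.mp hx with he | h
          · subst he
            by_cases hmem : x ∈ acc
            · exact Or.inl hmem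
            · exact absurd ⟨(slice_eq_iff s x n).mpr hpx, hmem⟩ hc
          · exact Or.inr ⟨h, hpx⟩

-- one ghost step
theorem ghost_succ (s : List Char) (n : Nat) :
    pvGhost s (n + 1) =
      pvMonths.foldl (fun acc m => if PySem.List.slice s (some (n : Int)) (some ((n : Int) + (m.length : Int))) = m ∧ m ∉ acc then acc ++ [m] else acc) (pvGhost s n) := by
  have hrange : PySem.List.pyRange 0 ((n + 1 : Nat) : Int) 1 = PySem.List.pyRange 0 (n : Int) 1 ++ [(n : Int)] := by
    push_cast
    exact PySem.List.pyRange_one_succ_right (by omega)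
  rw [pvGhost, hrange, List.foldl_append]
  rfl

-- invariant of the ghost positional scan
theorem outer_fold (s : List Char) (n : Nat) :
    (∀ a ∈ pvGhost s n, a ∈ pvMonths) ∧
    (pvGhost s n).Nodup ∧
    (pvGhost s n).Pairwise (fun a b => PySem.Chars.find s a < PySem.Chars.find s b) ∧
    (∀ x, x ∈ pvGhost s n ↔ x ∈ pvMonths ∧ 0 ≤ PySem.Chars.find s x ∧ PySem.Chars.find s x < (n : Int)) := by
  induction n with
  | zero =>
    rw [pvGhost, PySem.List.pyRange_one_eq_nil (by omega)]
    refine ⟨by simp, by simp, by simp, by intro x; simp⟩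
  | succ n ih =>
    obtain ⟨r1, r2, r3, r4⟩ := ih
    have hub : ∀ a ∈ pvGhost s n, 0 ≤ PySem.Chars.find s a ∧ PySem.Chars.find s a ≤ (n : Int) := by
      intro a ha
      have := (r4 a).mp ha
      exact ⟨this.2.1, by omega⟩
    have hcomp : ∀ x ∈ pvMonths, 0 ≤ PySem.Chars.find s x → PySem.Chars.find s x < (n : Int) → x ∈ pvGhost s n := by
      intro x hx h0 hlt
      exact (r4 x).mpr ⟨hx, h0, hlt⟩
    rw [ghost_succ]
    obtain ⟨q1, q2, q3, q4, q5⟩ := inner_fold s n pvMonths (pvGhost s n) (fun m hm => hm) r1 r2 r3 hub hcomp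
    refine ⟨q1, q2, q3, ?_⟩
    intro x
    rw [q5 x]
    constructor
    · rintro (hx | ⟨hx, hpx⟩)
      · have := (r4 x).mp hx
        exact ⟨this.1, this.2.1, by omega⟩
      · have := prefix_drop_key s x n hpx
        exact ⟨hx, this.1, by push_cast; omega⟩
    · rintro ⟨hx, h0, hlt⟩
      have hle : PySem.Chars.find s x ≤ (n : Int) := by push_cast at hlt; omega
      rcases eq_or_lt_of_le hle with he | h
      · refine Or.inr ⟨hx, ?_⟩
        have h1 := (PySem.Chars.find_spec h0).1
        rw [he] at h1
        simpa using h1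
      · exact Or.inl ((r4 x).mpr ⟨hx, h0, h⟩)

-- A's output is the first two entries of the full ghost list
theorem A_char (date_range : String) :
    extract_months date_range =
      (((pvGhost (PySem.Chars.lower date_range.toList) (PySem.Chars.lower date_range.toList).length)[0]?).map String.ofList,
       ((pvGhost (PySem.Chars.lower date_range.toList) (PySem.Chars.lower date_range.toList).length)[1]?).map String.ofList) := by
  unfold extract_months
  simp only []
  generalize PySem.Chars.lower date_range.toList = s
  obtain ⟨r1, r2, r3, r4⟩ := outer_fold s s.length
  have hfilter : pvMonths.foldl (fun acc month => if PySem.Chars.isIn month s then acc ++ [month] else acc) [] = pvMonths.filter (fun m => PySem.Chars.isIn m s) := by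
    have := PySem.List.foldl_append_if (fun m => PySem.Chars.isIn m s) (id : List Char → List Char) pvMonths []
    simpa using this
  rw [hfilter]
  have hperm : (pvGhost s s.length).Perm (pvMonths.filter (fun m => PySem.Chars.isIn m s)) := by
    rw [List.perm_ext_iff_of_nodup r2 (months_nodup.filter _)]
    intro x
    rw [r4 x, List.mem_filter]
    constructor
    · rintro ⟨hx, h0, _⟩
      exact ⟨hx, by rw [PySem.Chars.isIn_iff_infix]; exact (PySem.Chars.find_nonneg_iff s x).mp h0⟩
    · rintro ⟨hx, hin⟩
      have h0 : 0 ≤ PySem.Chars.find s x :=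
        (PySem.Chars.find_nonneg_iff s x).mpr ((PySem.Chars.isIn_iff_infix x s).mp hin)
      exact ⟨hx, h0, key_lt_len s x (months_ne_nil x hx) h0⟩
  have hsorted := PySem.List.sorted_eq_of_perm_of_pairwise_lt (pvMonths.filter (fun m => PySem.Chars.isIn m s)) _ (fun x => PySem.Chars.find s x) hperm r3
  rw [hsorted]
  rcases pvGhost s s.length with _ | ⟨a, _ | ⟨b, t⟩⟩ <;> simp

-- at most one predicate hit that is not yet in acc: no hit → fold is the identity
theorem fold_none (s : List Char) (n : Nat) (l : List (List Char)) (acc : List (List Char))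
    (h : ∀ m ∈ l, ¬ (PySem.List.slice s (some (n : Int)) (some ((n : Int) + (m.length : Int))) = m ∧ m ∉ acc)) :
    l.foldl (fun acc m => if PySem.List.slice s (some (n : Int)) (some ((n : Int) + (m.length : Int))) = m ∧ m ∉ acc then acc ++ [m] else acc) acc = acc := by
  induction l with
  | nil => rfl
  | cons x l ih =>
    simp only [List.foldl_cons, if_neg (h x (List.mem_cons_self ..))]
    exact ih (fun m hm => h m (List.mem_cons_of_mem _ hm))

-- exactly one hit m (every other hit equals m): fold appends m once
theorem fold_one (s : List Char) (n : Nat) (m : List Char) (l : List (List Char)) (acc : List (List Char))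
    (huniq : ∀ x ∈ l, PySem.List.slice s (some (n : Int)) (some ((n : Int) + (x.length : Int))) = x → x = m)
    (hm : m ∈ l)
    (hmatch : PySem.List.slice s (some (n : Int)) (some ((n : Int) + (m.length : Int))) = m)
    (hnot : m ∉ acc) :
    l.foldl (fun acc m => if PySem.List.slice s (some (n : Int)) (some ((n : Int) + (m.length : Int))) = m ∧ m ∉ acc then acc ++ [m] else acc) acc = acc ++ [m] := by
  induction l generalizing acc with
  | nil => cases hm
  | cons x l ih =>
    by_cases hx : x = m
    · subst hx
      simp only [List.foldl_cons, if_pos (And.intro hmatch hnot)]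
      refine fold_none s n l (acc ++ [x]) ?_
      intro y hy ⟨hsl, hyn⟩
      exact hyn (by simp [huniq y (List.mem_cons_of_mem _ hy) hsl])
    · have hnx : ¬ (PySem.List.slice s (some (n : Int)) (some ((n : Int) + (x.length : Int))) = x ∧ x ∉ acc) := by
        rintro ⟨hsl, _⟩
        exact hx (huniq x (List.mem_cons_self ..) hsl)
      simp only [List.foldl_cons, if_neg hnx]
      rcases List.mem_cons.mp hm with h | h
      · exact absurd h.symm hx
      · exact ih acc (fun y hy hsl => huniq y (List.mem_cons_of_mem _ hy) hsl) h hnot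

-- the ghost list only grows at the right: earlier stages are prefixes
theorem fold_prefix (s : List Char) (n : Nat) (l : List (List Char)) (acc : List (List Char)) :
    acc <+: l.foldl (fun acc m => if PySem.List.slice s (some (n : Int)) (some ((n : Int) + (m.length : Int))) = m ∧ m ∉ acc then acc ++ [m] else acc) acc := by
  induction l generalizing acc with
  | nil => exact List.prefix_refl acc
  | cons x l ih =>
    simp only [List.foldl_cons]
    split_ifs
    · exact (List.prefix_append acc [x]).trans (ih (acc ++ [x]))
    · exact ih acc

theorem ghost_mono (s : List Char) (i n : Nat) (h : i ≤ n) : pvGhost s i <+: pvGhost s n := by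
  induction n with
  | zero =>
    have : i = 0 := by omega
    subst this; exact List.prefix_refl _
  | succ n ihn =>
    rcases Nat.lt_or_ge i (n + 1) with hlt | hge
    · exact (ihn (by omega)).trans (by rw [ghost_succ]; exact fold_prefix s n pvMonths (pvGhost s n))
    · have : i = n + 1 := by omega
      subst this; exact List.prefix_refl _

def pvOptList : Option (List Char) → List (List Char)
  | none => []
  | some f => [f]

-- B's scan, started at position i with the ghost state of position i, lands on the
-- first two entries of the full ghost list
theorem scan_eq (s : List Char) (k i : Nat) (first : Option (List Char))
    (hk : k = s.length - i) (hle : i ≤ s.length)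
    (hinv : pvGhost s i = pvOptList first) :
    pvScanB s i first = ((pvGhost s s.length)[0]?, (pvGhost s s.length)[1]?) := by
  induction k generalizing i first with
  | zero =>
    have hi : i = s.length := by omega
    rw [pvScanB, dif_neg (by omega)]
    subst hi
    rw [hinv]
    cases first <;> simp [pvOptList]
  | succ k ihk =>
    have hi : i < s.length := by omega
    rw [pvScanB, dif_pos hi]
    rcases hfind : pvMonths.find? (fun m => PySem.Chars.startswith (s.drop i) m && decide (some m ≠ first)) with _ | m
    · -- no new month starts at i: ghost is unchanged
      have hnone : ∀ m ∈ pvMonths, ¬ (PySem.List.slice s (some (i : Int)) (some ((i : Int) + (m.length : Int))) = m ∧ m ∉ pvGhost s i) := by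
        rintro m hm ⟨hsl, hnm⟩
        have hpre : m <+: s.drop i := (slice_eq_iff s m i).mp hsl
        have hfindm := List.find?_eq_none.mp hfind m hm
        simp only [Bool.and_eq_true, decide_eq_true_eq, PySem.Chars.startswith_iff, not_and] at hfindm
        have heq : some m = first := not_not.mp (hfindm hpre)
        rw [hinv, ← heq] at hnm
        exact hnm (by simp [pvOptList])
      have hg : pvGhost s (i + 1) = pvOptList first := by
        rw [ghost_succ, fold_none s i pvMonths (pvGhost s i) hnone, hinv]
      exact ihk (i + 1) first (by omega) (by omega) hg
    · -- month m starts at i and is new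
      have hsome := List.find?_some hfind
      have hmem := List.mem_of_find?_eq_some hfind
      simp only [Bool.and_eq_true, decide_eq_true_eq] at hsome
      have hpre : m <+: s.drop i := (PySem.Chars.startswith_iff _ _).mp hsome.1
      have hne : some m ≠ first := hsome.2
      have huniq : ∀ x ∈ pvMonths, PySem.List.slice s (some (i : Int)) (some ((i : Int) + (x.length : Int))) = x → x = m := by
        intro x hx hsl
        exact uniq_at s i x m hx hmem ((slice_eq_iff s x i).mp hsl) hpre
      have hnot : m ∉ pvGhost s i := by
        rw [hinv]
        cases first with
        | none => simp [pvOptList]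
        | some f =>
          simp only [pvOptList, List.mem_singleton]
          intro h; exact hne (by rw [h])
      have hg : pvGhost s (i + 1) = pvOptList first ++ [m] := by
        rw [ghost_succ, fold_one s i m pvMonths (pvGhost s i) huniq hmem ((slice_eq_iff s m i).mpr hpre) hnot, hinv]
      cases first with
      | none =>
        exact ihk (i + 1) (some m) (by omega) (by omega) (by rw [hg]; rfl)
      | some f =>
        -- early return: [f, m] is a prefix of the full ghost list
        have hpfx : [f, m] <+: pvGhost s s.length := by
          have h1 : pvGhost s (i + 1) = [f, m] := by rw [hg]; rfl
          rw [← h1]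
          exact ghost_mono s (i + 1) s.length (by omega)
        obtain ⟨t, ht⟩ := hpfx
        show ((some f : Option (List Char)), (some m : Option (List Char))) = _
        rw [← ht]
        simp

-- ===== VERDICT (by name: the statement is the Claim_ definition above) =====
theorem extract_months_spec : Claim_equal_extract_months := by
  intro date_range _
  show extract_months date_range = extract_months_alt date_range
  rw [A_char]
  unfold extract_months_alt
  simp only []
  rw [scan_eq (PySem.Chars.lower date_range.toList) (PySem.Chars.lower date_range.toList).length 0 none rfl (by omega)
      (by rw [pvGhost, PySem.List.pyRange_one_eq_nil (by omega)]; rfl)]
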